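-- pv_equiv track=rewrite | github.com/dumontal/advent-of-code | 2015/day-21/script.py | win_battle
-- ===== SOURCE A (Python) =====
-- def win_battle(character):
--     # a loadout is a tuple ('damage', 'armor')
--     boss         = (8, 2)
--     character_hp = 100
--     boss_hp      = 100
--
--     character_atk = max(character[0] - boss[1], 1)
--     boss_atk      = max(boss[0] - character[1], 1)
--
--     boss_turn = False
--     while boss_hp > 0 and character_hp > 0:
--         if boss_turn:
--             character_hp -= boss_atk
--         else:
--             boss_hp -= character_atk
--
--         boss_turn = not boss_turn
--
--     return character_hp > 0
-- ===== SOURCE B (Python) =====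
-- def win_battle(character):
--     # closed form: turns each side needs to kill the 100-HP opponent; character strikes first
--     character_atk = max(character[0] - 2, 1)
--     boss_atk = max(8 - character[1], 1)
--     char_turns = (100 + character_atk - 1) // character_atk
--     boss_turns = (100 + boss_atk - 1) // boss_atk
--     return char_turns <= boss_turns
-- ===== Notes on version B (the rewrite author's own statement) =====
-- stated objective: faster
-- what changed: Replaces the turn-by-turn battle simulation loop with a constant-time ceiling-division comparison of the number of turns each side needs to kill the other.
import Mathlib
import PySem

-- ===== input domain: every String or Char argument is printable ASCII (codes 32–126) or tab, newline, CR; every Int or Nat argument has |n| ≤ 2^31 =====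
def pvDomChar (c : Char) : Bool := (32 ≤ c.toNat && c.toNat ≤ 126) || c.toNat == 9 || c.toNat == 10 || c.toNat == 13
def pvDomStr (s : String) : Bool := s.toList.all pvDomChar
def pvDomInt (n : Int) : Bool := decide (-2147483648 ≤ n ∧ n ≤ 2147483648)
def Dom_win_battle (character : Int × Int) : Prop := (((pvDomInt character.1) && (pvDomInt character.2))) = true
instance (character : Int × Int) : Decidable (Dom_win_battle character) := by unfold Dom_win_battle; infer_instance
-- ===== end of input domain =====

-- B replaces A's turn-by-turn simulation loop with a constant-time ceiling-division comparison (objective: faster).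

-- ===== PORT A =====
-- the while loop of A, one half-turn per call; terminates because each step lowers one hp by an attack ≥ 1
def winLoop (catk batk : Int) (hc : 1 ≤ catk) (hb : 1 ≤ batk)
    (character_hp boss_hp : Int) (boss_turn : Bool) : Bool :=
  if boss_hp > 0 ∧ character_hp > 0 then
    if boss_turn then winLoop catk batk hc hb (character_hp - batk) boss_hp false
    else winLoop catk batk hc hb character_hp (boss_hp - catk) true
  else decide (character_hp > 0)
termination_by boss_hp.toNat + character_hp.toNat
decreasing_by all_goals omega

def win_battle (character : Int × Int) : Bool :=
  -- boss = (8, 2); character_hp = boss_hp = 100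
  let character_atk := max (character.1 - 2) 1
  let boss_atk := max (8 - character.2) 1
  winLoop character_atk boss_atk (le_max_right _ _) (le_max_right _ _) 100 100 false

-- ===== PORT B =====
def win_battle_alt (character : Int × Int) : Bool :=
  let character_atk := max (character.1 - 2) 1
  let boss_atk := max (8 - character.2) 1
  let char_turns := PySem.Int.floordiv (100 + character_atk - 1) character_atk
  let boss_turns := PySem.Int.floordiv (100 + boss_atk - 1) boss_atk
  decide (char_turns ≤ boss_turns)

-- ===== PRECONDITION & SPEC =====
def Spec_win_battle (character : Int × Int) (out : Bool) : Prop := out = win_battle_alt character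
instance (character : Int × Int) (out : Bool) : Decidable (Spec_win_battle character out) := by unfold Spec_win_battle; infer_instance

-- ===== CLAIM (what is proved, stated in full; the proofs are below) =====
def Claim_equal_win_battle : Prop := ∀ (character : Int × Int), Dom_win_battle character → Spec_win_battle character (win_battle character)

-- ===== LEMMAS AND PROOFS =====
lemma ceil_shift (x a : Int) (ha : 0 < a) : (x + a - 1) / a = (x - 1) / a + 1 := by
  have h : x + a - 1 = (x - 1) + 1 * a := by ring
  rw [h, Int.add_mul_ediv_right _ _ (ne_of_gt ha)]

lemma ceil_one {x a : Int} (ha : 0 < a) (h1 : 1 ≤ x) (h2 : x ≤ a) : (x + a - 1) / a = 1 := by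
  rw [ceil_shift x a ha, Int.ediv_eq_zero_of_lt (by omega) (by omega)]; ring

lemma ceil_pos {x a : Int} (ha : 0 < a) (h1 : 1 ≤ x) : 1 ≤ (x + a - 1) / a := by
  rw [ceil_shift x a ha]
  have := Int.ediv_nonneg (show (0:Int) ≤ x - 1 by omega) (le_of_lt ha)
  omega

lemma ceil_ge_two {x a : Int} (ha : 0 < a) (h : a < x) : 2 ≤ (x + a - 1) / a := by
  rw [ceil_shift x a ha]
  have : 1 ≤ (x - 1) / a := by
    rw [Int.le_ediv_iff_mul_le ha]; omega
  omega

lemma ceil_step {x a : Int} (ha : 0 < a) : (x + a - 1) / a = ((x - a) + a - 1) / a + 1 := by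
  rw [ceil_shift x a ha, ceil_shift (x - a) a ha]
  have h : x - 1 = (x - a - 1) + 1 * a := by ring
  rw [h, Int.add_mul_ediv_right _ _ (ne_of_gt ha)]

lemma loop_closed : ∀ (n : Nat) (catk batk chp bhp : Int) (hc : 1 ≤ catk) (hb : 1 ≤ batk),
    1 ≤ chp → 1 ≤ bhp → bhp.toNat ≤ n →
    winLoop catk batk hc hb chp bhp false =
      decide ((bhp + catk - 1) / catk ≤ (chp + batk - 1) / batk) := by
  intro n
  induction n with
  | zero => intro catk batk chp bhp hc hb h1 h2 hn; omega
  | succ n ih =>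
    intro catk batk chp bhp hc hb h1 h2 hn
    rw [winLoop, if_pos (by omega), if_neg (by simp)]
    by_cases hbk : bhp - catk ≤ 0
    · -- boss dies on the character's strike: A returns true
      rw [winLoop, if_neg (by omega)]
      have hL : (bhp + catk - 1) / catk = 1 := ceil_one (by omega) h2 (by omega)
      have hR : 1 ≤ (chp + batk - 1) / batk := ceil_pos (by omega) h1
      simp [hL]
      omega
    · rw [winLoop, if_pos (by omega), if_pos rfl]
      by_cases hck : chp - batk ≤ 0
      · -- character dies on the boss's strike: A returns false
        rw [winLoop, if_neg (by omega)]
        have hR : (chp + batk - 1) / batk = 1 := ceil_one (by omega) h1 (by omega)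
        have hL : 2 ≤ (bhp + catk - 1) / catk := ceil_ge_two (by omega) (by omega)
        simp [hR]
        omega
      · -- both survive: one full round, both ceilings drop by exactly 1
        rw [ih catk batk (chp - batk) (bhp - catk) hc hb (by omega) (by omega) (by omega)]
        rw [show ((bhp - catk) + catk - 1) / catk = (bhp + catk - 1) / catk - 1 by
              have := ceil_step (x := bhp) (a := catk) (by omega); omega,
            show ((chp - batk) + batk - 1) / batk = (chp + batk - 1) / batk - 1 by
              have := ceil_step (x := chp) (a := batk) (by omega); omega]
        simp only [decide_eq_decide]
        omega

-- ===== VERDICT (by name: the statement is the Claim_ definition above) =====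
theorem win_battle_spec : Claim_equal_win_battle := by
  intro c _
  unfold Spec_win_battle win_battle win_battle_alt
  dsimp only
  rw [PySem.Int.floordiv_eq_ediv_of_pos (by omega), PySem.Int.floordiv_eq_ediv_of_pos (by omega)]
  exact loop_closed 100 _ _ 100 100 (le_max_right _ _) (le_max_right _ _)
    (by omega) (by omega) (by omega)
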